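-- pv_equiv track=rewrite | github.com/nhakobyan685/homework | title.py | custom_title
-- ===== SOURCE A (Python) =====
-- def custom_title(text):
--     result = ""
--     should_capitalize = True
--     for char in text:
--         if char == " ":
--             should_capitalize = True
--         elif should_capitalize:
--             result += char.upper()
--             should_capitalize = False
--         else:
--             result += char
--     return result
-- ===== SOURCE B (Python) =====
-- def custom_title(text):
--     return "".join(w[:1].upper() + w[1:] for w in text.split(" "))
-- ===== Notes on version B (the rewrite author's own statement) =====
-- stated objective: idiomatic
-- what changed: Replaces the char-by-char capitalize-flag loop with a token-level one-liner: split on the literal space, capitalize each token's first character via w[:1].upper() + w[1:], and join with the empty string.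
import Mathlib
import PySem

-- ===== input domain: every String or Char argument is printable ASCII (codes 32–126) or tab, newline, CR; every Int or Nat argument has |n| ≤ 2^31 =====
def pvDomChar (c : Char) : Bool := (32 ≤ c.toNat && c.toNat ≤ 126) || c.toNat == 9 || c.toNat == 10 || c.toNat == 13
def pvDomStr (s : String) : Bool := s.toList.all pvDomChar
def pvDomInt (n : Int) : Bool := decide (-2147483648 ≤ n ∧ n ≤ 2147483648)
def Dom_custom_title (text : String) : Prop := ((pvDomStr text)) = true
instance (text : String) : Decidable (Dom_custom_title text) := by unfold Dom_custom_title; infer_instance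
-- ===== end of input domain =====

-- B: idiomatic token-level rewrite — split on the literal space, capitalize each token's first char, join with "".


-- ===== PORT A =====
-- A's loop: state = (result so far, should_capitalize flag); char.upper() is PySem.Chars.upper on a 1-char list.
def customTitleLoop : List Char → List Char → Bool → List Char
  | [], res, _ => res
  | c :: cs, res, cap =>
    if c = ' ' then customTitleLoop cs res true
    else if cap then customTitleLoop cs (res ++ PySem.Chars.upper [c]) false
    else customTitleLoop cs (res ++ [c]) cap

def custom_title (text : String) : String :=
  String.ofList (customTitleLoop text.toList [] true)

-- ===== PORT B =====
-- text.split(" ") ported as List.splitOn ' ' (exact for a one-char separator, empty pieces kept);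
-- w[:1].upper() + w[1:] as (take 1 mapped through upperChar) ++ drop 1; "".join as flatten.
def custom_title_alt (text : String) : String :=
  String.ofList ((((text.toList.splitOn ' ').map
    (fun w => (w.take 1).map PySem.Chars.upperChar ++ w.drop 1))).flatten)

-- ===== PRECONDITION & SPEC =====
def Spec_custom_title (text : String) (out : String) : Prop := out = custom_title_alt text
instance (text : String) (out : String) : Decidable (Spec_custom_title text out) := by unfold Spec_custom_title; infer_instance

-- ===== CLAIM (what is proved, stated in full; the proofs are below) =====
def Claim_equal_custom_title : Prop := ∀ (text : String), Dom_custom_title text → Spec_custom_title text (custom_title text)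

-- ===== LEMMAS AND PROOFS =====

-- common specification: the title-cased characters, directly by recursion on the text
def ctSpec : Bool → List Char → List Char
  | _, [] => []
  | cap, c :: cs =>
    if c = ' ' then ctSpec true cs
    else (if cap then PySem.Chars.upperChar c else c) :: ctSpec false cs

def ctPiece (w : List Char) : List Char := (w.take 1).map PySem.Chars.upperChar ++ w.drop 1

theorem loop_eq_spec (cs : List Char) : ∀ res cap, customTitleLoop cs res cap = res ++ ctSpec cap cs := by
  induction cs with
  | nil => intro res cap; simp [customTitleLoop, ctSpec]
  | cons c cs ih =>
    intro res cap
    by_cases hc : c = ' '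
    · simp [customTitleLoop, ctSpec, hc, ih]
    · cases cap <;> simp [customTitleLoop, ctSpec, hc, ih, PySem.Chars.upper]

theorem split_inv (cs : List Char) :
    ∃ w ws, cs.splitOn ' ' = w :: ws ∧
      w ++ (ws.map ctPiece).flatten = ctSpec false cs ∧
      ctPiece w ++ (ws.map ctPiece).flatten = ctSpec true cs := by
  induction cs with
  | nil => exact ⟨[], [], by simp [ctSpec, ctPiece]⟩
  | cons c cs ih =>
    obtain ⟨w, ws, hs, h1, h2⟩ := ih
    by_cases hc : c = ' '
    · refine ⟨[], w :: ws, ?_, ?_, ?_⟩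
      · simp [List.splitOn, List.splitOnP_cons, hc, List.splitOn] at hs ⊢
        simpa [hc] using hs
      · simpa [ctSpec, hc, ctPiece] using h2
      · simpa [ctSpec, hc, ctPiece] using h2
    · refine ⟨c :: w, ws, ?_, ?_, ?_⟩
      · simp [List.splitOn, List.splitOnP_cons, hc] at hs ⊢
        simp [hs]
      · simp [ctSpec, hc]
        simpa [ctPiece] using h1
      · simp [ctSpec, hc]
        simpa [ctPiece] using h1

-- ===== VERDICT (by name: the statement is the Claim_ definition above) =====
theorem custom_title_spec : Claim_equal_custom_title := by
  intro text _
  unfold Spec_custom_title custom_title custom_title_alt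
  obtain ⟨w, ws, hs, _, h2⟩ := split_inv text.toList
  have hflat : (((w :: ws).map (fun w => (w.take 1).map PySem.Chars.upperChar ++ w.drop 1)).flatten)
      = ctSpec true text.toList := by
    rw [← h2]; rfl
  rw [loop_eq_spec, hs, hflat]
  simp
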